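-- pv_equiv track=rewrite | github.com/pypi-data/pypi-mirror-139 | packages/honest-ml/honest_ml-0.6.tar.gz/honest_ml-0.6/honest_ml/visualizer/visualizer.py | _get_coefs
-- ===== SOURCE A (Python) =====
-- def _get_coefs(metrics, coef_names):
--     coefs = {}.fromkeys(coef_names)
--     for coef in coefs:
--         coefs[coef] = []
--     for run in metrics:
--         for coef in run['coef']:
--             for index in range(len(coef_names)):
--                 key = coef_names[index]
--                 coefs[key].append(coef[index])
--     return coefs
-- ===== SOURCE B (Python) =====
-- def _get_coefs(metrics, coef_names):
--     positions = {}
--     for index, name in enumerate(coef_names):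
--         positions.setdefault(name, []).append(index)
--     all_coefs = [vec for run in metrics for vec in run['coef']]
--     return {name: [vec[i] for vec in all_coefs for i in idxs]
--             for name, idxs in positions.items()}
-- ===== Notes on version B (the rewrite author's own statement) =====
-- stated objective: alternative
-- what changed: Instead of A's triple-nested loop appending element-by-element into the dict, B builds a positions index (name -> list of its indices) once, flattens all coefficient vectors into one list, and constructs each name's list in a single comprehension; duplicate names and insertion order are preserved exactly.
import Mathlib
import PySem

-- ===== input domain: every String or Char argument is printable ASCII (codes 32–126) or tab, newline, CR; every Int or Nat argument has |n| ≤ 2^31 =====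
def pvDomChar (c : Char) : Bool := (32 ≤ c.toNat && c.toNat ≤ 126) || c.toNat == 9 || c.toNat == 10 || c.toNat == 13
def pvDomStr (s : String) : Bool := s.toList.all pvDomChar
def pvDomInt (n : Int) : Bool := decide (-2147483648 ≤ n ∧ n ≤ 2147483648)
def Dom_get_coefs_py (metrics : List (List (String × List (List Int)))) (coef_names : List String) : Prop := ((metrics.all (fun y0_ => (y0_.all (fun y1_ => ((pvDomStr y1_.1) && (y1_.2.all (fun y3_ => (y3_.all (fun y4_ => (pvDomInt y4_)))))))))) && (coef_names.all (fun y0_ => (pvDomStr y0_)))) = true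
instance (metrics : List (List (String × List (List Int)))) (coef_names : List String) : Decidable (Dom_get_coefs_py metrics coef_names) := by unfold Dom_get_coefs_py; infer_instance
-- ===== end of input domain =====

-- B replaces A's triple-nested element-by-element dict appends by a positions index (name -> its indices)
-- plus one flattened list of all coef vectors, building each name's list in one comprehension (objective: alternative).

-- ===== PORT A =====
-- run['coef'] : first-match lookup; `none` is Python's KeyError, excluded by Pre_ (getD [] is then unreachable)
def coefLookup (run : List (String × List (List Int))) : List (List Int) :=
  ((PySem.Dict.mk run).get? "coef").getD []

def get_coefs_py (metrics : List (List (String × List (List Int)))) (coef_names : List String) : List (String × List Int) :=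
  -- coefs = {}.fromkeys(coef_names); for coef in coefs: coefs[coef] = []
  -- (fused into one typed dict build: fromkeys's None values are all immediately overwritten with [])
  let coefs0 : PySem.Dict String (List Int) :=
    coef_names.foldl (fun d coef => d.insert coef []) PySem.Dict.empty
  -- for run in metrics: for coef in run['coef']: for index in range(len(coef_names)): coefs[coef_names[index]].append(coef[index])
  -- (pyGetD defaults are unreachable under Pre_: index < len(coef_names) ≤ len(coef))
  let coefs : PySem.Dict String (List Int) :=
    metrics.foldl (fun coefs run =>
      (coefLookup run).foldl (fun coefs coef =>
        (PySem.List.pyRange 0 (coef_names.length : Int)).foldl (fun coefs index =>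
          let key := PySem.List.pyGetD coef_names index ""
          coefs.modify key [] (fun v => v ++ [PySem.List.pyGetD coef index 0])) coefs) coefs) coefs0
  coefs.items

-- ===== PORT B =====
def get_coefs_py_alt (metrics : List (List (String × List (List Int)))) (coef_names : List String) : List (String × List Int) :=
  -- positions = {}; for index, name in enumerate(coef_names): positions.setdefault(name, []).append(index)
  let positions : PySem.Dict String (List Int) :=
    (PySem.List.enumerate coef_names).foldl
      (fun d p => d.modify p.2 [] (fun v => v ++ [p.1])) PySem.Dict.empty
  -- all_coefs = [vec for run in metrics for vec in run['coef']]
  let all_coefs : List (List Int) := metrics.flatMap (fun run => coefLookup run)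
  -- {name: [vec[i] for vec in all_coefs for i in idxs] for name, idxs in positions.items()}
  let out : PySem.Dict String (List Int) :=
    positions.items.foldl
      (fun d p => d.insert p.1 (all_coefs.flatMap (fun vec => p.2.map (fun i => PySem.List.pyGetD vec i 0))))
      PySem.Dict.empty
  out.items

-- ===== PRECONDITION & SPEC =====
-- Pre_ excludes exactly the inputs where A raises: a run without a 'coef' key (KeyError) or a coef
-- vector shorter than coef_names (IndexError). B raises on the same inputs.
def Pre_get_coefs_py (metrics : List (List (String × List (List Int)))) (coef_names : List String) : Prop :=
  ∀ run ∈ metrics, ((PySem.Dict.mk run).get? "coef").isSome = true ∧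
    ∀ vec ∈ ((PySem.Dict.mk run).get? "coef").getD [], coef_names.length ≤ vec.length
instance (metrics : List (List (String × List (List Int)))) (coef_names : List String) : Decidable (Pre_get_coefs_py metrics coef_names) := by unfold Pre_get_coefs_py; infer_instance

def pvWitness_get_coefs_py : (List (List (String × List (List Int)))) × List String :=
  ([[("coef", [[1, 2], [3, 4]])]], ["a", "b"])

def Spec_get_coefs_py (metrics : List (List (String × List (List Int)))) (coef_names : List String) (out : List (String × List Int)) : Prop := out = get_coefs_py_alt metrics coef_names
instance (metrics : List (List (String × List (List Int)))) (coef_names : List String) (out : List (String × List Int)) : Decidable (Spec_get_coefs_py metrics coef_names out) := by unfold Spec_get_coefs_py; infer_instance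

-- ===== CLAIM (what is proved, stated in full; the proofs are below) =====
def Claim_equal_get_coefs_py : Prop := ∀ (metrics : List (List (String × List (List Int)))) (coef_names : List String), Dom_get_coefs_py metrics coef_names → Pre_get_coefs_py metrics coef_names → Spec_get_coefs_py metrics coef_names (get_coefs_py metrics coef_names)

-- ===== LEMMAS AND PROOFS =====

-- the indices of coef_names at which the name is k, as A's range loop visits them
def extractIdx (coef_names : List String) (k : String) : List Int :=
  (PySem.List.pyRange 0 (coef_names.length : Int)).filter
    (fun i => PySem.List.pyGetD coef_names i "" == k)

-- the same indices as B's positions dict stores them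
def occIdx (coef_names : List String) (k : String) : List Int :=
  ((PySem.List.enumerate coef_names).filter (fun p => p.2 == k)).map (fun p => p.1)

theorem getD_foldl_insert_nil (l : List String) (d : PySem.Dict String (List Int)) (k : String)
    (h : d.getD k ([] : List Int) = []) :
    (l.foldl (fun d c => d.insert c ([] : List Int)) d).getD k [] = [] := by
  induction l generalizing d with
  | nil => simpa using h
  | cons c t ih =>
      simp only [List.foldl_cons]
      exact ih _ (by rw [PySem.Dict.getD_insert]; split_ifs <;> simp [h])

theorem inner_getD (coef_names : List String) (vec : List Int)
    (d : PySem.Dict String (List Int)) (k : String) :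
    ((PySem.List.pyRange 0 (coef_names.length : Int)).foldl (fun coefs index =>
        coefs.modify (PySem.List.pyGetD coef_names index "") []
          (fun v => v ++ [PySem.List.pyGetD vec index 0])) d).getD k []
      = d.getD k [] ++ (extractIdx coef_names k).map (fun i => PySem.List.pyGetD vec i 0) := by
  have hm := List.foldl_map (f := fun i => (PySem.List.pyGetD coef_names i "", PySem.List.pyGetD vec i 0))
      (g := fun (d : PySem.Dict String (List Int)) (p : String × Int) => d.modify p.1 [] (fun v => v ++ [p.2]))
      (l := PySem.List.pyRange 0 (coef_names.length : Int)) (init := d)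
  rw [← hm, PySem.Dict.getD_foldl_modify_append]
  simp [extractIdx, List.filter_map, List.map_map, Function.comp_def]

theorem vecs_getD (coef_names : List String) (vs : List (List Int))
    (d : PySem.Dict String (List Int)) (k : String) :
    (vs.foldl (fun coefs coef =>
        (PySem.List.pyRange 0 (coef_names.length : Int)).foldl (fun coefs index =>
          coefs.modify (PySem.List.pyGetD coef_names index "") []
            (fun v => v ++ [PySem.List.pyGetD coef index 0])) coefs) d).getD k []
      = d.getD k [] ++ vs.flatMap (fun vec => (extractIdx coef_names k).map (fun i => PySem.List.pyGetD vec i 0)) := by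
  induction vs generalizing d with
  | nil => simp
  | cons v t ih => simp [List.foldl_cons, ih, inner_getD]

theorem metrics_getD (coef_names : List String) (ms : List (List (String × List (List Int))))
    (d : PySem.Dict String (List Int)) (k : String) :
    (ms.foldl (fun coefs run =>
        (coefLookup run).foldl (fun coefs coef =>
          (PySem.List.pyRange 0 (coef_names.length : Int)).foldl (fun coefs index =>
            coefs.modify (PySem.List.pyGetD coef_names index "") []
              (fun v => v ++ [PySem.List.pyGetD coef index 0])) coefs) coefs) d).getD k []
      = d.getD k [] ++ (ms.flatMap coefLookup).flatMap (fun vec => (extractIdx coef_names k).map (fun i => PySem.List.pyGetD vec i 0)) := by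
  induction ms generalizing d with
  | nil => simp
  | cons m t ih => simp [List.foldl_cons, ih, vecs_getD]

theorem set_update_of_subset (s : PySem.Set String) (xs : List String)
    (h : ∀ x ∈ xs, x ∈ s) : PySem.Set.update s xs = s := by
  induction xs generalizing s with
  | nil => rfl
  | cons x t ih =>
      have hx : PySem.Set.add s x = s := by
        simp [PySem.Set.add, PySem.Set.contains_eq_listContains, List.contains_eq_mem, h x (by simp)]
      simp only [PySem.Set.update, List.foldl_cons, hx]
      exact ih s (fun y hy => h y (by simp [hy]))

theorem mem_pyRange_map_getD (coef_names : List String) (x : String)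
    (hx : x ∈ (PySem.List.pyRange 0 (coef_names.length : Int)).map (fun i => PySem.List.pyGetD coef_names i "")) :
    x ∈ coef_names := by
  rw [PySem.List.pyRange_zero_natCast] at hx
  simp only [List.map_map, List.mem_map, Function.comp_def] at hx
  obtain ⟨j, hj, rfl⟩ := hx
  rw [List.mem_range] at hj
  rw [PySem.List.pyGetD_natCast, List.getD_eq_getElem _ _ hj]
  exact List.getElem_mem _

theorem inner_keys (coef_names : List String) (vec : List Int)
    (d : PySem.Dict String (List Int)) (h : d.keys = PySem.Set.ofList coef_names) :
    ((PySem.List.pyRange 0 (coef_names.length : Int)).foldl (fun coefs index =>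
        coefs.modify (PySem.List.pyGetD coef_names index "") []
          (fun v => v ++ [PySem.List.pyGetD vec index 0])) d).keys = PySem.Set.ofList coef_names := by
  rw [PySem.Dict.keys_foldl_modify_key, h, set_update_of_subset]
  intro x hx
  rw [PySem.Set.mem_ofList]
  exact mem_pyRange_map_getD coef_names x hx

theorem keysA (coef_names : List String) (ms : List (List (String × List (List Int))))
    (d : PySem.Dict String (List Int)) (h : d.keys = PySem.Set.ofList coef_names) :
    (ms.foldl (fun coefs run =>
        (coefLookup run).foldl (fun coefs coef =>
          (PySem.List.pyRange 0 (coef_names.length : Int)).foldl (fun coefs index =>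
            coefs.modify (PySem.List.pyGetD coef_names index "") []
              (fun v => v ++ [PySem.List.pyGetD coef index 0])) coefs) coefs) d).keys
      = PySem.Set.ofList coef_names := by
  induction ms generalizing d with
  | nil => simpa using h
  | cons m t ih =>
      simp only [List.foldl_cons]
      refine ih _ ?_
      generalize coefLookup m = vs
      induction vs generalizing d with
      | nil => simpa using h
      | cons v tv ihv =>
          simp only [List.foldl_cons]
          exact ihv _ (inner_keys coef_names v d h)

theorem enumerate_map_snd (xs : List String) (s : Int) :
    (PySem.List.enumerate xs s).map (fun p => p.2) = xs := by
  induction xs generalizing s with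
  | nil => rfl
  | cons x t ih => simp [PySem.List.enumerate, ih]

theorem enumerate_filter_idx (xs : List String) (k : String) (s : Int) :
    ((PySem.List.enumerate xs s).filter (fun p => p.2 == k)).map (fun p => p.1)
      = ((List.range xs.length).filter (fun j => xs.getD j "" == k)).map
          (fun j : Nat => s + (j : Int)) := by
  induction xs generalizing s with
  | nil => rfl
  | cons x t ih =>
      simp only [PySem.List.enumerate, List.length_cons, List.range_succ_eq_map,
        List.filter_cons, List.filter_map, Function.comp_def,
        List.getD_cons_succ, List.getD_cons_zero]
      by_cases hx : (x == k) = true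
      · simp only [hx, if_pos, List.map_cons]
        rw [ih]
        simp only [List.map_map, Nat.succ_eq_add_one, Nat.cast_zero, add_zero,
          List.cons.injEq, true_and, Function.comp_def]
        exact List.map_congr_left fun j _ => by push_cast; ring
      · simp only [hx, Bool.false_eq_true, if_false]
        rw [ih]
        simp only [List.map_map, Nat.succ_eq_add_one, Function.comp_def]
        exact List.map_congr_left fun j _ => by push_cast; ring

theorem extract_eq_occ (coef_names : List String) (k : String) :
    extractIdx coef_names k = occIdx coef_names k := by
  unfold extractIdx occIdx
  rw [PySem.List.pyRange_zero_natCast, List.filter_map, enumerate_filter_idx]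
  simp [Function.comp_def, PySem.List.pyGetD_natCast]

-- ===== VERDICT (by name: the statement is the Claim_ definition above) =====
theorem get_coefs_py_spec : Claim_equal_get_coefs_py := by
  intro metrics coef_names _ _
  unfold Spec_get_coefs_py get_coefs_py get_coefs_py_alt
  dsimp only
  have hc0keys : (List.foldl (fun d coef => d.insert coef ([] : List Int)) PySem.Dict.empty coef_names).keys
      = PySem.Set.ofList coef_names := by
    rw [PySem.Dict.keys_foldl_insert (f := fun _ _ => ([] : List Int))]
    rw [PySem.Dict.keys_empty]
    rfl
  have hAkeys := keysA coef_names metrics _ hc0keys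
  have hAnodup : (List.foldl (fun coefs run =>
      (coefLookup run).foldl (fun coefs coef =>
        (PySem.List.pyRange 0 (coef_names.length : Int)).foldl (fun coefs index =>
          coefs.modify (PySem.List.pyGetD coef_names index "") []
            (fun v => v ++ [PySem.List.pyGetD coef index 0])) coefs) coefs)
      (List.foldl (fun d coef => d.insert coef ([] : List Int)) PySem.Dict.empty coef_names) metrics).keys.Nodup := by
    rw [hAkeys]; exact PySem.Set.nodup_ofList _
  rw [PySem.Dict.items_eq_map_keys _ hAnodup ([] : List Int), hAkeys]
  have hposkeys : (List.foldl (fun d p => d.modify p.2 [] fun v => v ++ [p.1]) PySem.Dict.empty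
      (PySem.List.enumerate coef_names)).keys = PySem.Set.ofList coef_names := by
    rw [PySem.Dict.keys_foldl_modify_key (key := fun p : Int × String => p.2)
      (d0 := ([] : List Int)) (f := fun _ p v => v ++ [p.1]), enumerate_map_snd,
      PySem.Dict.keys_empty]
    rfl
  have hposnodup : (List.foldl (fun d p => d.modify p.2 [] fun v => v ++ [p.1]) PySem.Dict.empty
      (PySem.List.enumerate coef_names)).keys.Nodup := by
    rw [hposkeys]; exact PySem.Set.nodup_ofList _
  have hposgetD : ∀ k : String, (List.foldl (fun d p => d.modify p.2 [] fun v => v ++ [p.1]) PySem.Dict.empty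
      (PySem.List.enumerate coef_names)).getD k [] = occIdx coef_names k := by
    intro k
    have hm := List.foldl_map (f := fun p : Int × String => (p.2, p.1))
      (g := fun (d : PySem.Dict String (List Int)) (p : String × Int) => d.modify p.1 [] (fun v => v ++ [p.2]))
      (l := PySem.List.enumerate coef_names)
      (init := (PySem.Dict.empty : PySem.Dict String (List Int)))
    have : (List.foldl (fun d p => d.modify p.2 [] fun v => v ++ [p.1]) PySem.Dict.empty
        (PySem.List.enumerate coef_names))
        = List.foldl (fun (d : PySem.Dict String (List Int)) (p : String × Int) => d.modify p.1 [] (fun v => v ++ [p.2]))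
            PySem.Dict.empty ((PySem.List.enumerate coef_names).map (fun p => (p.2, p.1))) := hm.symm
    rw [this, PySem.Dict.getD_foldl_modify_append]
    simp [occIdx, List.filter_map, List.map_map, Function.comp_def]
  rw [PySem.Dict.items_foldl_insert_fresh _ (fun p : String × List Int => p.1)
    (fun p : String × List Int => (List.flatMap (fun vec => List.map (fun i => PySem.List.pyGetD vec i 0) p.2)
      (List.flatMap (fun run => coefLookup run) metrics))) PySem.Dict.empty
    (fun a _ => PySem.Dict.contains_empty _) (by simpa [PySem.Dict.keys] using hposnodup)]
  rw [PySem.Dict.items_eq_map_keys _ hposnodup ([] : List Int), hposkeys]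
  have hitems : (PySem.Dict.empty : PySem.Dict String (List Int)).items = ([] : List (String × List Int)) := rfl
  rw [hitems, List.nil_append]
  simp only [List.map_map, Function.comp_def]
  refine List.map_congr_left fun k _ => ?_
  rw [metrics_getD, getD_foldl_insert_nil _ _ _ (PySem.Dict.getD_empty _ _), hposgetD, extract_eq_occ]
  simp
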